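-- pv_equiv track=rewrite | github.com/janyacollege22-glitch/CMPSC-Final-Project | labs/LAB3.py | is_power_of
-- ===== SOURCE A (Python) =====
-- def is_power_of(base, num):
--     """
--         >>> is_power_of(5, 625)  # pow(5, 4) = 5 * 5 * 5 * 5 = 625
--         True
--         >>> is_power_of(5, 1)    # pow(5, 0) = 1
--         True
--         >>> is_power_of(5, 5)    # pow(5, 1) = 5
--         True
--         >>> is_power_of(5, 15)   # 15 is not a power of 5 (it's a multiple)
--         False
--         >>> is_power_of(3, 9)
--         True
--         >>> is_power_of(3, 8)
--         False
--         >>> is_power_of(3, 10)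
--         False
--         >>> is_power_of(1, 8)
--         False
--         >>> is_power_of(2, 0)    # 0 is not a power of any positive base.
--         False
--         >>> is_power_of(4, 16)
--         True
--         >>> is_power_of(4, 64)
--         True
--         >>> is_power_of(4, 63)
--         False
--         >>> is_power_of(4, 65)
--         False
--         >>> is_power_of(4, 32)
--         False
--     """
--     ## YOUR CODE STARTS HERE
--     if num == 1: # any number to the power of 0 is 1, so we can return True if num is 1
--         return True # if num is 1, then it is a power of base (base^0 = 1)
--     elif num < 1 or base <= 1:# if num is less than 1, then it cannot be a power of base (since powers of positive integers are always greater than or equal to 1). Also, if base is less than or equal to 1, then it cannot be a power of any number (since powers of 1 are always 1, and powers of numbers less than 1 are always less than 1).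
--         return False
--     else:
--         return is_power_of(base, num // base) if num % base == 0 else False# if num is divisible by base, then we can check if num // base is a power of base. If num is not divisible by base, then it cannot be a power of base, so we return False.
--
--     pass
-- ===== SOURCE B (Python) =====
-- def is_power_of(base, num):
--     # Iterative re-implementation: repeated division with a local accumulator instead of recursion.
--     if num == 1:
--         return True
--     if num < 1 or base <= 1:
--         return False
--     while num % base == 0:
--         num //= base
--         if num == 1:
--             return True
--     return False
-- ===== Notes on version B (the rewrite author's own statement) =====
-- stated objective: alternative
-- what changed: Replaced the tail recursion by an iterative while-loop that keeps the running quotient in a local variable.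
import Mathlib
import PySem

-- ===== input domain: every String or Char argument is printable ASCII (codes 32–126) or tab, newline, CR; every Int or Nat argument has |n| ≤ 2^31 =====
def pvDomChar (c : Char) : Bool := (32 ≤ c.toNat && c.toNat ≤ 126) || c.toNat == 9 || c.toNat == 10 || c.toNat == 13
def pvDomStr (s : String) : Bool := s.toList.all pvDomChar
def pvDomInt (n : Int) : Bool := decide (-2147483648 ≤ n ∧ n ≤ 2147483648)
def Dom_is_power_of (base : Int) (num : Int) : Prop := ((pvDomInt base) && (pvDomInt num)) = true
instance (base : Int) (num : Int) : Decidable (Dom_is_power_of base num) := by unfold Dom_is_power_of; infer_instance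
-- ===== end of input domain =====

-- B replaces A's tail recursion by an iterative loop on a running quotient (ported with an explicit fuel bound); alternative decomposition, same cost.


-- ===== PORT A =====
-- literal port of A's recursion
def is_power_of (base : Int) (num : Int) : Bool :=
  if num == 1 then true
  else if num < 1 || base ≤ 1 then false
  else if PySem.Int.mod num base == 0 then is_power_of base (PySem.Int.floordiv num base)
  else false
termination_by num.toNat
decreasing_by
  rename_i h1 h2 h3
  simp at h1 h2 h3
  have hb : (0:Int) < base := by omega
  rw [PySem.Int.floordiv_eq_ediv_of_pos hb]
  have : num / base < num := by
    rw [Int.ediv_lt_iff_lt_mul hb]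
    nlinarith
  have : 0 ≤ num / base := Int.ediv_nonneg (by omega) (by omega)
  omega

-- ===== PORT B =====
-- B's while-loop, as a fuel-bounded tail recursion (fuel = num.toNat bounds the
-- iteration count exactly; the loop body is Source B's body step for step)
def powLoop (base : Int) : Nat → Int → Bool
  | 0, _ => false
  | fuel+1, n =>
    if PySem.Int.mod n base == 0 then
      let n' := PySem.Int.floordiv n base
      if n' == 1 then true else powLoop base fuel n'
    else false

def is_power_of_alt (base : Int) (num : Int) : Bool :=
  if num == 1 then true
  else if num < 1 || base ≤ 1 then false
  else powLoop base num.toNat num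

-- ===== PRECONDITION & SPEC =====
def Spec_is_power_of (base : Int) (num : Int) (out : Bool) : Prop := out = is_power_of_alt base num
instance (base : Int) (num : Int) (out : Bool) : Decidable (Spec_is_power_of base num out) := by unfold Spec_is_power_of; infer_instance

-- ===== CLAIM (what is proved, stated in full; the proofs are below) =====
def Claim_equal_is_power_of : Prop := ∀ (base : Int) (num : Int), Dom_is_power_of base num → Spec_is_power_of base num (is_power_of base num)

-- ===== LEMMAS AND PROOFS =====

lemma powLoop_eq (base : Int) (hb : 2 ≤ base) :
    ∀ (fuel : Nat) (n : Int), 2 ≤ n → n.toNat ≤ fuel →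
      powLoop base fuel n = is_power_of base n := by
  intro fuel
  induction fuel with
  | zero => intro n hn hf; omega
  | succ f ih =>
    intro n hn hf
    rw [is_power_of]
    have h1 : (n == 1) = false := by simp; omega
    have h2 : (n < 1 || base ≤ 1) = false := by simp; omega
    rw [h1, h2]
    simp only [powLoop, Bool.false_eq_true, if_false]
    by_cases hm : PySem.Int.mod n base == 0
    · rw [if_pos hm, if_pos hm]
      have hbpos : (0:Int) < base := by omega
      have hdvd : base ∣ n := by
        have := PySem.Int.mod_eq_zero_iff_dvd n base
        simp at hm
        exact (this).mp hm
      set n' := PySem.Int.floordiv n base with hn'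
      have hediv : n' = n / base := PySem.Int.floordiv_eq_ediv_of_pos hbpos
      have hlt : n / base < n := by
        rw [Int.ediv_lt_iff_lt_mul hbpos]
        nlinarith
      have hge1 : 1 ≤ n / base := by
        have : base ≤ n := Int.le_of_dvd (by omega) hdvd
        exact Int.le_ediv_iff_mul_le hbpos |>.mpr (by omega)
      by_cases he : n' == 1
      · simp only [he, if_true]
        have : n' = 1 := by simpa using he
        rw [this, is_power_of]; simp
      · simp only [he, Bool.false_eq_true, if_false]
        have hne : n' ≠ 1 := by simpa using he
        have h2n' : 2 ≤ n' := by omega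
        exact ih n' h2n' (by omega)
    · rw [if_neg hm, if_neg hm]

-- ===== VERDICT (by name: the statement is the Claim_ definition above) =====
theorem is_power_of_spec : Claim_equal_is_power_of := by
  intro base num _
  unfold Spec_is_power_of is_power_of_alt
  by_cases h1 : num == 1
  · rw [if_pos h1, is_power_of, if_pos h1]
  · rw [if_neg h1]
    by_cases h2 : (num < 1 || base ≤ 1) = true
    · rw [if_pos h2, is_power_of, if_neg h1, if_pos h2]
    · rw [if_neg h2]
      have hb : 2 ≤ base := by simp at h2; omega
      have hn : 2 ≤ num := by simp at h1 h2; omega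
      exact (powLoop_eq base hb num.toNat num hn (le_refl _)).symm
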